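-- pv_equiv track=rewrite | github.com/leroux/axi-assistant | bot.py | _parse_channel_topic
-- ===== SOURCE A (Python) =====
-- def _parse_channel_topic(topic: str | None) -> tuple[str | None, str | None]:
--     """Parse cwd and session_id from a channel topic. Returns (cwd, session_id)."""
--     if not topic:
--         return None, None
--     cwd = None
--     session_id = None
--     for part in topic.split("|"):
--         part = part.strip()
--         if part.startswith("cwd: "):
--             cwd = part[5:].strip()
--         elif part.startswith("session: "):
--             session_id = part[9:].strip()
--     return cwd, session_id
-- ===== SOURCE B (Python) =====
-- def _last_field(parts, tag):
--     """Value of the last part carrying the given tag, or None."""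
--     matches = [p[len(tag):].strip() for p in parts if p.startswith(tag)]
--     return matches[-1] if matches else None
--
--
-- def _parse_channel_topic(topic):
--     """Parse cwd and session_id from a channel topic. Returns (cwd, session_id)."""
--     if not topic:
--         return None, None
--     parts = [p.strip() for p in topic.split("|")]
--     return _last_field(parts, "cwd: "), _last_field(parts, "session: ")
-- ===== Notes on version B (the rewrite author's own statement) =====
-- stated objective: simpler
-- what changed: A's single forward pass threading two scalar accumulators through an if/elif chain is replaced by a staged pipeline: strip all parts once, then for each field independently collect its tagged values with a comprehension and take the last.
import Mathlib
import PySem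

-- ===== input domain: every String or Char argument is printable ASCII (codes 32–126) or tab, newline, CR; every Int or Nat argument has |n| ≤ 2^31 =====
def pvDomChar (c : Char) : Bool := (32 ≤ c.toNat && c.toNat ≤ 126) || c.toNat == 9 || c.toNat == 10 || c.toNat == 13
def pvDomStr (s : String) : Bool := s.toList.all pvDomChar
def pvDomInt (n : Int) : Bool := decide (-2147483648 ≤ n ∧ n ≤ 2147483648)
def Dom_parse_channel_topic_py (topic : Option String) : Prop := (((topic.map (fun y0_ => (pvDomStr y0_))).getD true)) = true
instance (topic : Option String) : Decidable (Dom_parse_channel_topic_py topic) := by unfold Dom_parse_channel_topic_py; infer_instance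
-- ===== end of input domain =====

-- B replaces A's single accumulating if/elif pass with a staged pipeline: strip all parts once,
-- then for each field independently collect its tagged values and take the last; objective: simpler decomposition.

-- ===== PORT A =====
def parse_channel_topic_py (topic : Option String) : Option String × Option String :=
  match topic with
  | none => (none, none)
  | some t =>
    if t = "" then (none, none)
    else
      ((PySem.Str.split? t "|").getD []).foldl
        (fun (cs : Option String × Option String) part =>
          let p := PySem.Str.strip part
          if PySem.Str.startswith p "cwd: " then
            (some (PySem.Str.strip (PySem.Str.slice p (some 5) none)), cs.2)
          else if PySem.Str.startswith p "session: " then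
            (cs.1, some (PySem.Str.strip (PySem.Str.slice p (some 9) none)))
          else cs)
        (none, none)

-- ===== PORT B =====
-- port of Source B's helper _last_field: comprehension (filter + map), then matches[-1] if matches else None
def pvLastField (parts : List String) (tag : String) : Option String :=
  ((parts.filter (fun p => PySem.Str.startswith p tag)).map
    (fun p => PySem.Str.strip (PySem.Str.slice p (some (PySem.Str.len tag)) none))).getLast?

def parse_channel_topic_py_alt (topic : Option String) : Option String × Option String :=
  match topic with
  | none => (none, none)
  | some t =>
    if t = "" then (none, none)
    else
      let parts := ((PySem.Str.split? t "|").getD []).map PySem.Str.strip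
      (pvLastField parts "cwd: ", pvLastField parts "session: ")

-- ===== PRECONDITION & SPEC =====
def Spec_parse_channel_topic_py (topic : Option String) (out : Option String × Option String) : Prop := out = parse_channel_topic_py_alt topic
instance (topic : Option String) (out : Option String × Option String) : Decidable (Spec_parse_channel_topic_py topic out) := by unfold Spec_parse_channel_topic_py; infer_instance

-- ===== CLAIM (what is proved, stated in full; the proofs are below) =====
def Claim_equal_parse_channel_topic_py : Prop := ∀ (topic : Option String), Dom_parse_channel_topic_py topic → Spec_parse_channel_topic_py topic (parse_channel_topic_py topic)

-- ===== LEMMAS AND PROOFS =====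

-- value extracted from one stripped part for a given tag
def pvMatch (tag : String) (part : String) : Option String :=
  if PySem.Str.startswith (PySem.Str.strip part) tag then
    some (PySem.Str.strip (PySem.Str.slice (PySem.Str.strip part) (some (PySem.Str.len tag)) none))
  else none

-- a stripped part cannot start with both "cwd: " and "session: "
theorem pvMatch_not_both (part : String)
    (h : PySem.Str.startswith (PySem.Str.strip part) "cwd: " = true) :
    PySem.Str.startswith (PySem.Str.strip part) "session: " = false := by
  by_contra hc
  rw [Bool.not_eq_false] at hc
  rw [PySem.Str.startswith_eq, PySem.Chars.startswith_iff] at h hc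
  rcases List.prefix_or_prefix_of_prefix h hc with h' | h' <;>
    exact absurd h' (by decide)

theorem pvA_fold (l : List String) (c s : Option String) :
    l.foldl
      (fun (cs : Option String × Option String) part =>
        let p := PySem.Str.strip part
        if PySem.Str.startswith p "cwd: " then
          (some (PySem.Str.strip (PySem.Str.slice p (some 5) none)), cs.2)
        else if PySem.Str.startswith p "session: " then
          (cs.1, some (PySem.Str.strip (PySem.Str.slice p (some 9) none)))
        else cs)
      (c, s)
    = ((l.reverse.findSome? (pvMatch "cwd: ")).or c,
       (l.reverse.findSome? (pvMatch "session: ")).or s) := by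
  induction l generalizing c s with
  | nil => simp
  | cons p l ih =>
    simp only [List.foldl_cons, List.reverse_cons, List.findSome?_append]
    rw [ih]
    by_cases h1 : PySem.Str.startswith (PySem.Str.strip p) "cwd: " = true
    · have h2 := pvMatch_not_both p h1
      simp [pvMatch, PySem.Str.startswith_eq] at h1 h2 ⊢
      simp [h1, h2]
    · by_cases h2 : PySem.Str.startswith (PySem.Str.strip p) "session: " = true
      · simp [pvMatch, PySem.Str.startswith_eq] at h1 h2 ⊢
        simp [h1, h2]
      · simp [pvMatch, PySem.Str.startswith_eq] at h1 h2 ⊢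
        simp [h1, h2]

theorem pvGetLast?_cons {α : Type} (a : α) (l : List α) :
    (a :: l).getLast? = l.getLast?.or (some a) := by
  induction l generalizing a with
  | nil => rfl
  | cons b l ih =>
    rw [List.getLast?_cons_cons, ih b]
    cases l.getLast? <;> rfl

-- B's filter-map-last over the pre-stripped parts equals the last tag match over the raw parts
theorem pvLast_eq (l : List String) (tag : String) :
    pvLastField (l.map PySem.Str.strip) tag = l.reverse.findSome? (pvMatch tag) := by
  induction l with
  | nil => rfl
  | cons p l ih =>
    unfold pvLastField at ih ⊢
    simp only [List.map_cons, List.reverse_cons, List.findSome?_append]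
    by_cases h : PySem.Str.startswith (PySem.Str.strip p) tag = true
    · simp only [List.filter_cons, h, if_true, List.map_cons, pvGetLast?_cons, ih]
      rw [PySem.Str.startswith_eq, PySem.Str.toList_strip] at h
      simp [pvMatch, PySem.Str.startswith_eq, PySem.Str.toList_strip, h]
    · simp only [List.filter_cons, h, Bool.false_eq_true, if_false, ih]
      rw [PySem.Str.startswith_eq, PySem.Str.toList_strip] at h
      simp [pvMatch, PySem.Str.startswith_eq, PySem.Str.toList_strip, h]

-- ===== VERDICT (by name: the statement is the Claim_ definition above) =====
theorem parse_channel_topic_py_spec : Claim_equal_parse_channel_topic_py := by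
  intro topic _
  unfold Spec_parse_channel_topic_py parse_channel_topic_py parse_channel_topic_py_alt
  match topic with
  | none => rfl
  | some t =>
    by_cases ht : t = ""
    · simp [ht]
    · simp only [ht, if_false]
      rw [pvA_fold, pvLast_eq, pvLast_eq]
      simp
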